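-- pv_equiv track=rewrite | github.com/psurply/ReGAL | regal/dump/probes/arduino_mega/dump.py | _get_input_state
-- ===== SOURCE A (Python) =====
-- def _get_input_state(payload, output_mask, fixed_input_size):
--     out = 0
--     offset = 0
--
--     for i in range(8):
--         if (output_mask >> i) & 1:
--             out |= ((payload[2] >> i) & 1) << offset;
--             offset += 1
--
--     return payload[0] | (payload[1] << 8) | (out << fixed_input_size)
-- ===== SOURCE B (Python) =====
-- def _pack(m, b):
--     # compress the bits of b selected by mask m, LSB first
--     if m == 0:
--         return 0
--     rest = _pack(m >> 1, b >> 1)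
--     if m & 1:
--         return (b & 1) | (rest << 1)
--     return rest
--
--
-- def _get_input_state(payload, output_mask, fixed_input_size):
--     out = _pack(output_mask & 0xFF, payload[2])
--     return payload[0] | (payload[1] << 8) | (out << fixed_input_size)
-- ===== Notes on version B (the rewrite author's own statement) =====
-- stated objective: alternative
-- what changed: Replaces the fixed 8-iteration loop with an offset counter by a recursive LSB-first bit compress that halves the masked output_mask and payload[2] together.
-- outside the precondition, e.g. on _get_input_state([1, 2], 0, 0): A returns 513, B raises IndexError
import Mathlib
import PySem

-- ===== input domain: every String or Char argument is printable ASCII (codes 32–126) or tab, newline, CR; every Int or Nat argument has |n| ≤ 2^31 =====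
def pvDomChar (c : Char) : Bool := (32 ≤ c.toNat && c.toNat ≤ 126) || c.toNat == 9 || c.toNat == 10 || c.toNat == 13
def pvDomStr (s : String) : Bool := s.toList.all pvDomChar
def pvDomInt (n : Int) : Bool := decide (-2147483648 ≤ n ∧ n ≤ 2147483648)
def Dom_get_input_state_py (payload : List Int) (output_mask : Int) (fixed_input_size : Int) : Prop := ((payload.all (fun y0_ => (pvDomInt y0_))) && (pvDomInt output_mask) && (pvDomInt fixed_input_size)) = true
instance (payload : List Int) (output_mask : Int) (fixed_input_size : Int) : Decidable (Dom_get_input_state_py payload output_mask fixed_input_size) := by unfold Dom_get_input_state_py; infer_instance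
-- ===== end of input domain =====

-- B replaces A's indexed 8-step loop with an offset counter by a recursive LSB-first
-- compress over the halved mask and payload bits (objective: alternative decomposition).


-- ===== PORT A =====
def get_input_state_py (payload : List Int) (output_mask : Int) (fixed_input_size : Int) : Int :=
  -- out = 0; offset = 0; for i in range(8): …
  let st := (PySem.List.pyRange 0 8 1).foldl (fun (st : Int × Int) i =>
      if PySem.Int.band (output_mask >>> i.toNat) 1 ≠ 0 then
        (PySem.Int.bor st.1 (PySem.Int.band (PySem.List.pyGetD payload 2 0 >>> i.toNat) 1 <<< st.2.toNat), st.2 + 1)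
      else st) (0, 0)
  PySem.Int.bor (PySem.List.pyGetD payload 0 0)
    (PySem.Int.bor (PySem.List.pyGetD payload 1 0 <<< (8:Nat)) (st.1 <<< fixed_input_size.toNat))

-- ===== PORT B =====
-- _pack(m, b): m is output_mask & 0xFF, hence a Nat (0..255); recursion on m >> 1
def pvPack (m : Nat) (b : Int) : Int :=
  if m = 0 then 0
  else
    let rest := pvPack (m >>> 1) (b >>> (1:Nat))
    if m &&& 1 ≠ 0 then PySem.Int.bor (PySem.Int.band b 1) (rest <<< (1:Nat))
    else rest
decreasing_by simp [Nat.shiftRight_succ, Nat.shiftRight_zero]; omega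

def get_input_state_py_alt (payload : List Int) (output_mask : Int) (fixed_input_size : Int) : Int :=
  let out := pvPack (PySem.Int.band output_mask 255).toNat (PySem.List.pyGetD payload 2 0)
  PySem.Int.bor (PySem.List.pyGetD payload 0 0)
    (PySem.Int.bor (PySem.List.pyGetD payload 1 0 <<< (8:Nat)) (out <<< fixed_input_size.toNat))

-- ===== PRECONDITION & SPEC =====
-- Pre_ excludes fixed_input_size < 0 (A raises ValueError on the final shift) and payloads of
-- length < 3: there A raises IndexError except when output_mask & 0xFF == 0 with length 2, a
-- degenerate payload on which B's unconditional payload[2] read raises IndexError.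
def Pre_get_input_state_py (payload : List Int) (output_mask : Int) (fixed_input_size : Int) : Prop :=
  0 ≤ fixed_input_size ∧ 3 ≤ payload.length
instance (payload : List Int) (output_mask : Int) (fixed_input_size : Int) : Decidable (Pre_get_input_state_py payload output_mask fixed_input_size) := by unfold Pre_get_input_state_py; infer_instance
def pvWitness_get_input_state_py : List Int × Int × Int := ([1, 2, 3], 5, 2)

def Spec_get_input_state_py (payload : List Int) (output_mask : Int) (fixed_input_size : Int) (out : Int) : Prop := out = get_input_state_py_alt payload output_mask fixed_input_size
instance (payload : List Int) (output_mask : Int) (fixed_input_size : Int) (out : Int) : Decidable (Spec_get_input_state_py payload output_mask fixed_input_size out) := by unfold Spec_get_input_state_py; infer_instance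

-- ===== CLAIM (what is proved, stated in full; the proofs are below) =====
def Claim_equal_get_input_state_py : Prop := ∀ (payload : List Int) (output_mask : Int) (fixed_input_size : Int), Dom_get_input_state_py payload output_mask fixed_input_size → Pre_get_input_state_py payload output_mask fixed_input_size → Spec_get_input_state_py payload output_mask fixed_input_size (get_input_state_py payload output_mask fixed_input_size)

-- ===== LEMMAS AND PROOFS =====

-- Python's  mask & 255  is  mask % 256  (floor mod)
lemma pv_band_255 (mask : Int) : PySem.Int.band mask 255 = PySem.Int.mod mask 256 := by
  rw [PySem.Int.mod_eq_emod_of_pos (by norm_num)]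
  unfold PySem.Int.band
  rcases le_or_gt 0 mask with h | h
  · rw [if_pos h, if_pos (by norm_num : (0:Int) <= 255)]
    have h1 : (255:Int).toNat = 2 ^ 8 - 1 := rfl
    rw [h1, Nat.and_two_pow_sub_one_eq_mod]
    have h2 : ((mask.toNat : Int)) = mask := Int.toNat_of_nonneg h
    push_cast
    omega
  · rw [if_neg (by omega), if_pos (by norm_num : (0:Int) <= 255)]
    set n := (-mask - 1).toNat with hn
    have hn' : (n : Int) = -mask - 1 := Int.toNat_of_nonneg (by omega)
    have h1 : (255:Int).toNat = 255 := rfl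
    rw [h1, Nat.and_comm, show (255:Nat) = 2 ^ 8 - 1 from rfl, Nat.and_two_pow_sub_one_eq_mod]
    have h2 : n % 2 ^ 8 <= 255 := by omega
    push_cast [h2]
    omega

-- nonnegativity helpers
lemma pv_bor_nonneg {a b : Int} (ha : 0 <= a) (hb : 0 <= b) : 0 <= PySem.Int.bor a b := by
  rw [PySem.Int.bor_of_nonneg ha hb]; exact Int.natCast_nonneg _

lemma pv_shl_nonneg {a : Int} (ha : 0 <= a) (k : Nat) : 0 <= a <<< k := by
  rw [Int.shiftLeft_eq]; positivity

lemma pv_band1_nonneg (a : Int) : 0 <= PySem.Int.band a 1 := by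
  rw [PySem.Int.band_one]; exact PySem.Int.mod_nonneg a (by norm_num)

lemma pv_cast_shl (a k : Nat) : ((a : Int) <<< k) = ((a <<< k : Nat) : Int) := rfl

-- pvPack is nonnegative
lemma pvPack_nonneg (m : Nat) (b : Int) : 0 <= pvPack m b := by
  induction m using Nat.strong_induction_on generalizing b with
  | _ m ih =>
    rw [pvPack]
    split
    · exact le_refl 0
    · rename_i hm
      have hrest : 0 <= pvPack (m >>> 1) (b >>> (1:Nat)) :=
        ih (m >>> 1) (by rw [Nat.shiftRight_succ, Nat.shiftRight_zero]; omega) (b >>> (1:Nat))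
      show 0 <= if m &&& 1 ≠ 0 then PySem.Int.bor (PySem.Int.band b 1) (pvPack (m >>> 1) (b >>> (1:Nat)) <<< (1:Nat)) else pvPack (m >>> 1) (b >>> (1:Nat))
      split
      · exact pv_bor_nonneg (pv_band1_nonneg b) (pv_shl_nonneg hrest 1)
      · exact hrest

-- pvPack on an even mask
lemma pvPack_even (m : Nat) (b : Int) (h : m % 2 = 0) : pvPack m b = pvPack (m >>> 1) (b >>> (1:Nat)) := by
  rw [pvPack]
  split
  · rename_i h0
    subst h0
    rw [Nat.shiftRight_eq_div_pow]
    norm_num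
    rw [pvPack]
    simp
  · rw [if_neg (by rw [Nat.and_one_is_mod, h]; simp)]

-- pvPack on an odd mask
lemma pvPack_odd (m : Nat) (b : Int) (h : m % 2 = 1) :
    pvPack m b = PySem.Int.bor (PySem.Int.band b 1) (pvPack (m >>> 1) (b >>> (1:Nat)) <<< (1:Nat)) := by
  rw [pvPack]
  rw [if_neg (by omega)]
  rw [if_pos (by rw [Nat.and_one_is_mod, h]; simp)]

-- Nat or/shift shuffle used in the loop invariant
lemma pv_orshift (O b P off : Nat) :
    (O ||| (b <<< off)) ||| (P <<< (off + 1)) = O ||| ((b ||| (P <<< 1)) <<< off) := by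
  apply Nat.eq_of_testBit_eq
  intro k
  simp only [Nat.testBit_or, Nat.testBit_shiftLeft]
  rcases lt_or_ge k off with h | h
  · have h1 : ¬ k >= off := by omega
    have h2 : ¬ k >= off + 1 := by omega
    simp [h1, h2]
  · rcases eq_or_lt_of_le h with rfl | h'
    · have h1 : ¬ off >= off + 1 := by omega
      simp [h1]
    · have h1 : k >= off := h
      have h2 : k >= off + 1 := by omega
      have h3 : k - off >= 1 := by omega
      have h4 : k - (off + 1) = k - off - 1 := by omega
      simp [h1, h2, h3, h4, Bool.or_assoc]

-- A's bit test at position j matches bit j of (mask & 255)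
lemma pv_test (mask : Int) (j : Nat) (hj : j < 8) :
    PySem.Int.band (mask >>> j) 1 = (((PySem.Int.band mask 255).toNat >>> j) % 2 : Nat) := by
  rw [PySem.Int.band_one, PySem.Int.mod_eq_emod_of_pos (by norm_num), pv_band_255,
    PySem.Int.mod_eq_emod_of_pos (by norm_num), Int.shiftRight_eq_div_pow,
    Nat.shiftRight_eq_div_pow]
  have h0 : (0:Int) <= mask % 256 := Int.emod_nonneg mask (by norm_num)
  have h1 : (((mask % 256).toNat) : Int) = mask % 256 := Int.toNat_of_nonneg h0
  push_cast
  rw [h1]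
  interval_cases j <;> norm_num <;> omega

-- the loop invariant: A's remaining loop over i = 8-n .. 7 ORs in exactly B's pack of the
-- remaining mask bits, shifted to the current offset
lemma pv_inv (mask p2 : Int) : ∀ (n : Nat), n <= 8 → ∀ (out off : Int), 0 <= out → 0 <= off →
    (((List.range' (8 - n) n).map (fun k => Int.ofNat k)).foldl (fun (st : Int × Int) i =>
      if PySem.Int.band (mask >>> i.toNat) 1 ≠ 0 then
        (PySem.Int.bor st.1 (PySem.Int.band (p2 >>> i.toNat) 1 <<< st.2.toNat), st.2 + 1)
      else st) (out, off)).1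
    = PySem.Int.bor out (pvPack ((PySem.Int.band mask 255).toNat >>> (8 - n)) (p2 >>> (8 - n)) <<< off.toNat) := by
  have hM : (PySem.Int.band mask 255).toNat < 256 := by
    rw [pv_band_255]
    have := PySem.Int.mod_lt mask (show (0:Int) < 256 by norm_num)
    omega
  intro n
  induction n with
  | zero =>
    intro _ out off hout hoff
    have h8 : (PySem.Int.band mask 255).toNat >>> (8 - 0) = 0 := by
      rw [Nat.shiftRight_eq_div_pow]
      norm_num
      omega
    rw [h8, pvPack]
    simp [Int.shiftLeft_eq, PySem.Int.bor_zero]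
  | succ n ih =>
    intro hn out off hout hoff
    have hj : 8 - (n+1) < 8 := by omega
    set j := 8 - (n+1) with hjdef
    have hsucc : 8 - n = j + 1 := by omega
    have ih' := ih (by omega)
    rw [hsucc] at ih'
    rw [List.range'_succ]
    simp only [List.map_cons, List.foldl_cons, show (Int.ofNat j).toNat = j from rfl]
    simp only [Int.shiftRight_natCast_right] at ih' ⊢
    rcases Nat.mod_two_eq_zero_or_one ((PySem.Int.band mask 255).toNat >>> j) with he | he
    · have hc : ¬ (PySem.Int.band (mask >>> j) 1 ≠ 0) := by
        rw [pv_test mask j hj, he]; simp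
      rw [if_neg hc]
      rw [ih' out off hout hoff]
      rw [pvPack_even _ _ he, ← Int.shiftRight_add p2 j 1,
        show ((PySem.Int.band mask 255).toNat >>> j) >>> 1 = (PySem.Int.band mask 255).toNat >>> (j+1) from (Nat.shiftRight_add _ _ _).symm]
    · have hc : (PySem.Int.band (mask >>> j) 1 ≠ 0) := by
        rw [pv_test mask j hj, he]; simp
      rw [if_pos hc]
      obtain ⟨O, rfl⟩ : ∃ O : Nat, out = (O : Int) := ⟨out.toNat, (Int.toNat_of_nonneg hout).symm⟩
      obtain ⟨t, rfl⟩ : ∃ t : Nat, off = (t : Int) := ⟨off.toNat, (Int.toNat_of_nonneg hoff).symm⟩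
      rw [ih' _ _ (pv_bor_nonneg (Int.natCast_nonneg O) (pv_shl_nonneg (pv_band1_nonneg _) _)) (by positivity)]
      rw [pvPack_odd _ _ he, ← Int.shiftRight_add p2 j 1,
        show ((PySem.Int.band mask 255).toNat >>> j) >>> 1 = (PySem.Int.band mask 255).toNat >>> (j+1) from (Nat.shiftRight_add _ _ _).symm]
      obtain ⟨bn, hb⟩ : ∃ bn : Nat, PySem.Int.band (p2 >>> j) 1 = (bn : Int) :=
        ⟨_, (Int.toNat_of_nonneg (pv_band1_nonneg _)).symm⟩
      obtain ⟨Pn, hP⟩ : ∃ Pn : Nat, pvPack ((PySem.Int.band mask 255).toNat >>> (j+1)) (p2 >>> (j+1)) = (Pn : Int) :=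
        ⟨_, (Int.toNat_of_nonneg (pvPack_nonneg _ _)).symm⟩
      rw [hb, hP]
      rw [show ((t : Int)).toNat = t from Int.toNat_natCast t,
        show ((t : Int) + 1).toNat = t + 1 from by omega]
      simp only [pv_cast_shl, PySem.Int.bor_natCast]
      exact_mod_cast pv_orshift O bn Pn t

-- ===== VERDICT (by name: the statement is the Claim_ definition above) =====
theorem get_input_state_py_spec : Claim_equal_get_input_state_py := by
  unfold Claim_equal_get_input_state_py
  intro payload output_mask fixed_input_size _ _
  unfold Spec_get_input_state_py
  have hl : PySem.List.pyRange 0 8 1 = (List.range' (8 - 8) 8).map (fun k => Int.ofNat k) := by decide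
  simp only [get_input_state_py, get_input_state_py_alt, hl]
  rw [pv_inv output_mask (PySem.List.pyGetD payload 2 0) 8 (by omega) 0 0 (by omega) (by omega)]
  norm_num [Int.shiftRight_zero, Int.shiftLeft_zero]
  rw [PySem.Int.bor_comm (0 : Int) _, PySem.Int.bor_zero]
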